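-- pv_equiv track=rewrite | github.com/NotSoPrivate/NotSoBot | mods/New_tags.py | special_split
-- ===== SOURCE A (Python) =====
-- def special_split(text):
-- 	spl = []
-- 	depth = 0
-- 	i = 0
-- 	lastVB = -1
-- 	# Search for first colon
-- 	while i < len(text):
-- 		if text[i] == ':':
-- 			lastVB = i + 1
-- 			spl.append(text[:i])
-- 			break
-- 		i += 1
-- 	if i == len(text):
-- 		return [text]
-- 	# Split string by vertical bars
-- 	c = ""
-- 	while i < len(text):
-- 		c = text[i]
-- 		if c == '{':
-- 			depth += 1
-- 		else:
-- 			if c == '}':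
-- 				depth -= 1
-- 			else:
-- 				if depth == 0 and c == '|':
-- 					spl.append(text[lastVB:i])
-- 					lastVB = i + 1
-- 		i += 1
-- 	if lastVB == -1:
-- 		spl.append(text)
-- 	else:
-- 		spl.append(text[lastVB:])
-- 	return spl
-- ===== SOURCE B (Python) =====
-- def special_split(text):
--     idx = text.find(':')
--     if idx == -1:
--         return [text]
--     # split everything after the colon on '|' at C speed, then re-join the pieces
--     # that were cut at a bar nested inside braces (running brace balance != 0)
--     pieces = text[idx + 1:].split('|')
--     parts = [text[:idx]]
--     cur = pieces[0]
--     bal = cur.count('{') - cur.count('}')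
--     for p in pieces[1:]:
--         if bal == 0:
--             parts.append(cur)
--             cur = p
--             bal = p.count('{') - p.count('}')
--         else:
--             cur = cur + '|' + p
--             bal += p.count('{') - p.count('}')
--     parts.append(cur)
--     return parts
-- ===== Notes on version B (the rewrite author's own statement) =====
-- stated objective: faster
-- what changed: B replaces A's single character-by-character scan with a depth counter by a split-then-merge strategy: it splits the text after the colon on every vertical bar with str.split, then re-joins adjacent pieces whose running brace balance (computed with str.count per piece) is nonzero.
import Mathlib
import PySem

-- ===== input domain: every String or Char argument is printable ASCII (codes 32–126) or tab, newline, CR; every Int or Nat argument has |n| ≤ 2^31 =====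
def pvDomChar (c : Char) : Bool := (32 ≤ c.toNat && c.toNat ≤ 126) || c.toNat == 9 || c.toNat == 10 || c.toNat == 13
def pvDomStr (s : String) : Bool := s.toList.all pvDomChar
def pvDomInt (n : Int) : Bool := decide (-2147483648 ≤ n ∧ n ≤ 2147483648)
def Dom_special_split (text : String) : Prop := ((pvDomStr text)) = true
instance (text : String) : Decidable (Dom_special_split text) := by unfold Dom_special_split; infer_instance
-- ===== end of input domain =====

-- B replaces A's per-character depth-counting scan with split-then-merge: split the tail on
-- every '|' and re-join the pieces cut at a brace-nested bar (running brace balance ≠ 0).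

-- ===== PORT A =====
-- first while loop: search for the first colon, returning its index
def ssAFind : List Char → Nat → Option Nat
  | [], _ => none
  | c :: rest, i => if c = ':' then some i else ssAFind rest (i + 1)

-- second while loop: state (depth, lastVB, spl), scanning chars from index i
def ssALoop (cs : List Char) : List Char → Nat → Int → Int → List String → List String × Int
  | [], _, _, lastVB, spl => (spl, lastVB)
  | c :: rest, i, depth, lastVB, spl =>
    if c = '{' then ssALoop cs rest (i + 1) (depth + 1) lastVB spl
    else if c = '}' then ssALoop cs rest (i + 1) (depth - 1) lastVB spl
    else if depth = 0 ∧ c = '|' then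
      ssALoop cs rest (i + 1) depth ((i : Int) + 1)
        (spl ++ [String.ofList (PySem.List.slice cs (some lastVB) (some (i : Int)))])
    else ssALoop cs rest (i + 1) depth lastVB spl

def special_split (text : String) : List String :=
  let cs := text.toList
  match ssAFind cs 0 with
  | none => [text]                      -- i == len(text): no colon found
  | some i =>
    -- break hit: lastVB = i+1, spl = [text[:i]], the scan continues at the colon's index i
    let p := ssALoop cs (cs.drop i) i 0 ((i : Int) + 1)
      [String.ofList (PySem.List.slice cs none (some (i : Int)))]
    if p.2 = -1 then p.1 ++ [text]
    else p.1 ++ [String.ofList (PySem.List.slice cs (some p.2) none)]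

-- ===== PORT B =====
-- bal = p.count('{') - p.count('}')
def ssDelta (p : List Char) : Int :=
  (PySem.Chars.count p ['{'] : Int) - (PySem.Chars.count p ['}'] : Int)

-- the body of B's for-loop over pieces[1:], state (parts, cur, bal)
def ssBStep (st : List String × List Char × Int) (q : List Char) : List String × List Char × Int :=
  if st.2.2 = 0 then (st.1 ++ [String.ofList st.2.1], q, ssDelta q)
  else (st.1, st.2.1 ++ '|' :: q, st.2.2 + ssDelta q)

def special_split_alt (text : String) : List String :=
  let idx := PySem.Str.find text ":"
  if idx = -1 then [text]
  else
    let cs := text.toList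
    let pieces := PySem.Chars.splitOn (PySem.List.slice cs (some (idx + 1)) none) ['|']
    let parts0 : List String := [String.ofList (PySem.List.slice cs none (some idx))]
    match pieces with
    | [] => parts0                      -- unreachable: str.split never returns an empty list
    | p :: ps =>
      let st := ps.foldl ssBStep (parts0, p, ssDelta p)
      st.1 ++ [String.ofList st.2.1]

-- ===== PRECONDITION & SPEC =====
def Spec_special_split (text : String) (out : List String) : Prop := out = special_split_alt text
instance (text : String) (out : List String) : Decidable (Spec_special_split text out) := by unfold Spec_special_split; infer_instance

-- ===== CLAIM (what is proved, stated in full; the proofs are below) =====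
def Claim_equal_special_split : Prop := ∀ (text : String), Dom_special_split text → Spec_special_split text (special_split text)

-- ===== LEMMAS AND PROOFS =====

-- reference shape: the top-level segments of a char list at starting depth d
def ssConsHd (c : Char) : List (List Char) → List (List Char)
  | [] => [[c]]
  | h :: t => (c :: h) :: t

def ssSegs : List Char → Int → List (List Char)
  | [], _ => [[]]
  | c :: r, d =>
    if c = '{' then ssConsHd c (ssSegs r (d + 1))
    else if c = '}' then ssConsHd c (ssSegs r (d - 1))
    else if c = '|' ∧ d = 0 then [] :: ssSegs r d
    else ssConsHd c (ssSegs r d)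

-- prepend a pending prefix to the first segment
def ssGlue (pre : List Char) : List (List Char) → List (List Char)
  | [] => [pre]
  | h :: t => (pre ++ h) :: t

-- char-level reference of str.split('|')
def ssSplitC : List Char → List (List Char)
  | [] => [[]]
  | c :: r => if c = '|' then [] :: ssSplitC r else ssConsHd c (ssSplitC r)

lemma ssConsHd_ne_nil (c : Char) (X : List (List Char)) : ssConsHd c X ≠ [] := by
  cases X <;> simp [ssConsHd]

lemma ssSegs_ne_nil (l : List Char) (d : Int) : ssSegs l d ≠ [] := by
  cases l with
  | nil => simp [ssSegs]
  | cons c r =>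
    simp only [ssSegs]
    split_ifs <;> first | exact ssConsHd_ne_nil _ _ | simp

lemma ssSplitC_ne_nil (l : List Char) : ssSplitC l ≠ [] := by
  cases l with
  | nil => simp [ssSplitC]
  | cons c r =>
    simp only [ssSplitC]
    split_ifs <;> first | exact ssConsHd_ne_nil _ _ | simp

lemma ssGlue_consHd (pre : List Char) (c : Char) (X : List (List Char)) :
    ssGlue pre (ssConsHd c X) = ssGlue (pre ++ [c]) X := by
  cases X <;> simp [ssConsHd, ssGlue]

lemma ssGlue_nil (X : List (List Char)) (h : X ≠ []) : ssGlue [] X = X := by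
  cases X with
  | nil => exact absurd rfl h
  | cons a t => simp [ssGlue]

-- A's find loop computes PySem.Chars.find for the one-char needle [':']
lemma ssAFind_go (cs : List Char) : ∀ k : Nat,
    PySem.Chars.find.go [':'] cs k = (match ssAFind cs k with | none => -1 | some i => (i : Int)) := by
  induction cs with
  | nil => intro k; simp [PySem.Chars.find.go, ssAFind]
  | cons c rest ih =>
    intro k
    by_cases hc : c = ':'
    · simp [PySem.Chars.find.go, ssAFind, hc, List.isPrefixOf]
    · simp only [PySem.Chars.find.go, ssAFind, List.isPrefixOf, Bool.and_true]
      rw [if_neg (by simpa using Ne.symm hc), if_neg hc, ih (k + 1)]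

lemma find_colon (text : String) :
    PySem.Str.find text ":" =
      (match ssAFind text.toList 0 with | none => -1 | some i => (i : Int)) := by
  have h : (":" : String).toList = [':'] := rfl
  rw [PySem.Str.find, h, PySem.Chars.find, ssAFind_go]

lemma ssAFind_some (cs : List Char) : ∀ k i : Nat, ssAFind cs k = some i →
    k ≤ i ∧ i - k < cs.length ∧ cs[i - k]? = some ':' := by
  induction cs with
  | nil => intro k i h; simp [ssAFind] at h
  | cons c rest ih =>
    intro k i h
    by_cases hc : c = ':'
    · simp [ssAFind, hc] at h
      subst h; simp [hc]
    · simp [ssAFind, hc] at h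
      obtain ⟨h1, h2, h3⟩ := ih (k + 1) i h
      refine ⟨by omega, by simpa using (by omega : i - k < rest.length + 1), ?_⟩
      have : i - k = (i - (k + 1)) + 1 := by omega
      rw [this, List.getElem?_cons_succ]; exact h3

-- Chars.count with a one-char needle is List.count
lemma ssCount_go (ch : Char) : ∀ (l : List Char) (fuel acc : Nat), l.length ≤ fuel →
    PySem.Chars.count.go [ch] fuel l acc = acc + l.count ch := by
  intro l
  induction l with
  | nil => intro fuel acc h; cases fuel <;> simp [PySem.Chars.count.go]
  | cons c t ih =>
    intro fuel acc h
    match fuel with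
    | 0 => simp at h
    | f + 1 =>
      by_cases hc : ch = c
      · rw [show PySem.Chars.count.go [ch] (f + 1) (c :: t) acc
            = PySem.Chars.count.go [ch] f t (acc + 1) by
          simp [PySem.Chars.count.go, List.isPrefixOf, hc]]
        rw [ih f (acc + 1) (by simpa using h)]
        simp [List.count_cons, hc]
        omega
      · rw [show PySem.Chars.count.go [ch] (f + 1) (c :: t) acc
            = PySem.Chars.count.go [ch] f t acc by
          simp [PySem.Chars.count.go, List.isPrefixOf, hc, Ne.symm hc]]
        rw [ih f acc (by simpa using h)]
        simp [List.count_cons, Ne.symm hc]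

lemma ssCount_single (l : List Char) (ch : Char) :
    PySem.Chars.count l [ch] = l.count ch := by
  simp [PySem.Chars.count, ssCount_go ch l l.length 0 le_rfl]

lemma ssDelta_count (l : List Char) :
    ssDelta l = (l.count '{' : Int) - (l.count '}' : Int) := by
  simp [ssDelta, ssCount_single]

lemma ssDelta_append (a b : List Char) : ssDelta (a ++ b) = ssDelta a + ssDelta b := by
  simp [ssDelta_count, List.count_append]; push_cast; ring

lemma ssDelta_single (c : Char) :
    ssDelta [c] = if c = '{' then 1 else if c = '}' then -1 else 0 := by
  simp [ssDelta_count, List.count_singleton]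
  split_ifs with h1 h2 <;> simp_all

lemma ssDelta_nil : ssDelta [] = 0 := by decide

lemma ssDelta_bar_cons (q : List Char) : ssDelta ('|' :: q) = ssDelta q := by
  have h : ssDelta ['|'] = 0 := by decide
  rw [show ('|' :: q) = ['|'] ++ q from rfl, ssDelta_append, h, zero_add]

-- Chars.splitOn on a one-char separator is the char-level ssSplitC
lemma ssSplitOn_go : ∀ (l : List Char) (fuel : Nat) (cur : List Char) (acc : List (List Char)),
    l.length < fuel →
    PySem.Chars.splitOn.go ['|'] fuel l cur acc = acc.reverse ++ ssGlue cur.reverse (ssSplitC l) := by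
  intro l
  induction l with
  | nil =>
    intro fuel cur acc h
    match fuel with
    | 0 => simp at h
    | f + 1 => simp [PySem.Chars.splitOn.go, ssSplitC, ssGlue]
  | cons c r ih =>
    intro fuel cur acc h
    match fuel with
    | 0 => simp at h
    | f + 1 =>
      by_cases hc : c = '|'
      · subst hc
        rw [show PySem.Chars.splitOn.go ['|'] (f + 1) ('|' :: r) cur acc
              = PySem.Chars.splitOn.go ['|'] f r [] (cur.reverse :: acc) by
            simp [PySem.Chars.splitOn.go, List.isPrefixOf]]
        rw [ih f [] (cur.reverse :: acc) (by simpa using h)]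
        simp only [List.reverse_nil]
        rw [ssGlue_nil _ (ssSplitC_ne_nil r)]
        simp [ssSplitC, ssGlue]
      · rw [show PySem.Chars.splitOn.go ['|'] (f + 1) (c :: r) cur acc
              = PySem.Chars.splitOn.go ['|'] f r (c :: cur) acc by
            simp [PySem.Chars.splitOn.go, List.isPrefixOf, hc, Ne.symm hc]]
        rw [ih f (c :: cur) acc (by simpa using h)]
        simp [ssSplitC, hc, ssGlue_consHd]

lemma ssSplitOn_eq (l : List Char) : PySem.Chars.splitOn l ['|'] = ssSplitC l := by
  rw [PySem.Chars.splitOn, ssSplitOn_go l (l.length + 1) [] [] (by omega)]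
  simp [ssGlue_nil _ (ssSplitC_ne_nil l)]

-- A's epilogue after the scan loop
def ssAFin (text : String) (cs : List Char) (st : List String × Int) : List String :=
  if st.2 = -1 then st.1 ++ [text]
  else st.1 ++ [String.ofList (PySem.List.slice cs (some st.2) none)]

-- A's scan loop, finalized, equals the reference segments glued behind the pending prefix
lemma ssA_loop (text : String) (cs : List Char) :
    ∀ (rest : List Char) (i v : Nat) (depth : Int) (spl : List String),
    rest = cs.drop i → v ≤ i →
    ssAFin text cs (ssALoop cs rest i depth ((v : Int)) spl)
      = spl ++ (ssGlue ((cs.drop v).take (i - v)) (ssSegs rest depth)).map String.ofList := by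
  intro rest
  induction rest with
  | nil =>
    intro i v depth spl hrest hv
    have hlen : cs.length ≤ i := by
      have := congrArg List.length hrest; simp at this; omega
    have hv' : ((v : Int)) ≠ -1 := by omega
    have htake : (cs.drop v).take (i - v) = cs.drop v :=
      List.take_of_length_le (by simp; omega)
    simp [ssALoop, ssAFin, hv', ssSegs, ssGlue, htake, PySem.List.slice_from_natCast]
  | cons c rest' ih =>
    intro i v depth spl hrest hv
    have hi : i < cs.length := by
      have := congrArg List.length hrest; simp at this; omega
    have hc : cs[i] = c := by
      have h0 : (cs.drop i)[0]'(by rw [← hrest]; simp) = c := by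
        simp [← hrest]
      simpa using h0
    have hrest' : rest' = cs.drop (i + 1) := by
      have h' := congrArg List.tail hrest
      simp [List.tail_drop] at h'
      exact h'
    have htake1 : (cs.drop v).take (i + 1 - v) = (cs.drop v).take (i - v) ++ [c] := by
      have h1 : i + 1 - v = (i - v) + 1 := by omega
      have h2 : (cs.drop v)[i - v]? = some c := by
        rw [List.getElem?_drop]
        rw [show v + (i - v) = i by omega, List.getElem?_eq_getElem hi, hc]
      rw [h1, List.take_succ, h2]
      simp
    by_cases h1 : c = '{'
    · rw [show ssALoop cs (c :: rest') i depth ((v : Int)) spl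
          = ssALoop cs rest' (i + 1) (depth + 1) ((v : Int)) spl by simp [ssALoop, h1]]
      rw [ih (i + 1) v (depth + 1) spl hrest' (by omega)]
      subst h1
      rw [htake1, show ssSegs ('{' :: rest') depth = ssConsHd '{' (ssSegs rest' (depth + 1)) by
        simp [ssSegs], ssGlue_consHd]
    · by_cases h2 : c = '}'
      · rw [show ssALoop cs (c :: rest') i depth ((v : Int)) spl
            = ssALoop cs rest' (i + 1) (depth - 1) ((v : Int)) spl by simp [ssALoop, h1, h2]]
        rw [ih (i + 1) v (depth - 1) spl hrest' (by omega)]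
        subst h2
        rw [htake1, show ssSegs ('}' :: rest') depth = ssConsHd '}' (ssSegs rest' (depth - 1)) by
          simp [ssSegs], ssGlue_consHd]
      · by_cases h3 : depth = 0 ∧ c = '|'
        · obtain ⟨hd, hcb⟩ := h3
          subst hd; subst hcb
          rw [show ssALoop cs ('|' :: rest') i 0 ((v : Int)) spl
              = ssALoop cs rest' (i + 1) 0 (((i + 1 : Nat) : Int))
                  (spl ++ [String.ofList (PySem.List.slice cs (some ((v : Nat) : Int)) (some (i : Int)))]) by
            simp [ssALoop]]
          rw [ih (i + 1) (i + 1) 0 _ hrest' le_rfl]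
          rw [show ssSegs ('|' :: rest') 0 = [] :: ssSegs rest' 0 by simp [ssSegs]]
          have hslice : PySem.List.slice cs (some ((v : Nat) : Int)) (some (i : Int))
              = (cs.drop v).take (i - v) := by
            rw [PySem.List.slice_natCast]
          obtain ⟨q, qs, hq⟩ : ∃ q qs, ssSegs rest' 0 = q :: qs := by
            cases hqq : ssSegs rest' 0 with
            | nil => exact absurd hqq (ssSegs_ne_nil rest' 0)
            | cons q qs => exact ⟨q, qs, rfl⟩
          rw [hq]
          simp [hslice, ssGlue, Nat.sub_self]
        · have hb : ¬ ('|' = c ∧ depth = 0) := fun hcc => h3 ⟨hcc.2, hcc.1.symm⟩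
          rw [show ssALoop cs (c :: rest') i depth ((v : Int)) spl
              = ssALoop cs rest' (i + 1) depth ((v : Int)) spl by simp [ssALoop, h1, h2, h3]]
          rw [ih (i + 1) v depth spl hrest' (by omega)]
          have hb' : ¬ (c = '|' ∧ depth = 0) := fun hcc => h3 ⟨hcc.2, hcc.1⟩
          rw [htake1, show ssSegs (c :: rest') depth = ssConsHd c (ssSegs rest' depth) by
            simp [ssSegs, h1, h2, hb'], ssGlue_consHd]

-- B's merge fold over the split pieces equals the same glued reference segments
lemma ssB_merge :
    ∀ (l : List Char) (parts : List String) (cur p : List Char) (ps : List (List Char)),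
    ssSplitC l = p :: ps →
    ((ps.foldl ssBStep (parts, cur ++ p, ssDelta (cur ++ p))).1
      ++ [String.ofList (ps.foldl ssBStep (parts, cur ++ p, ssDelta (cur ++ p))).2.1])
      = parts ++ (ssGlue cur (ssSegs l (ssDelta cur))).map String.ofList := by
  intro l
  induction l with
  | nil =>
    intro parts cur p ps h
    simp [ssSplitC] at h
    obtain ⟨hp, hps⟩ := h
    subst hp; subst hps
    simp [ssSegs, ssGlue]
  | cons c r ih =>
    intro parts cur p ps h
    by_cases hc : c = '|'
    · subst hc
      simp only [ssSplitC, if_true] at h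
      obtain ⟨hp, hps⟩ := List.cons.inj h
      subst hp
      obtain ⟨q, qs, hq⟩ : ∃ q qs, ssSplitC r = q :: qs := by
        cases hqq : ssSplitC r with
        | nil => exact absurd hqq (ssSplitC_ne_nil r)
        | cons q qs => exact ⟨q, qs, rfl⟩
      rw [← hps, hq, List.foldl_cons]
      by_cases hbal : ssDelta cur = 0
      · rw [show ssBStep (parts, cur ++ [], ssDelta (cur ++ [])) q
            = (parts ++ [String.ofList cur], q, ssDelta q) by
          simp [ssBStep, hbal]]
        have := ih (parts ++ [String.ofList cur]) [] q qs hq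
        simp only [List.nil_append] at this
        rw [this]
        rw [ssGlue_nil _ (ssSegs_ne_nil r _), ssDelta_nil]
        simp [ssSegs, hbal, ssGlue]
      · rw [show ssBStep (parts, cur ++ [], ssDelta (cur ++ [])) q
            = (parts, (cur ++ ['|']) ++ q, ssDelta ((cur ++ ['|']) ++ q)) by
          simp [ssBStep, hbal, ssDelta_append, ssDelta_bar_cons]; try ring]
        rw [ih parts (cur ++ ['|']) q qs hq]
        have hd : ssDelta (cur ++ ['|']) = ssDelta cur := by
          simp [ssDelta_append, ssDelta_single]
        rw [hd, show ssSegs ('|' :: r) (ssDelta cur) = ssConsHd '|' (ssSegs r (ssDelta cur)) by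
          simp [ssSegs, hbal], ssGlue_consHd]
    · simp only [ssSplitC, hc, if_false] at h
      obtain ⟨q, qs, hq⟩ : ∃ q qs, ssSplitC r = q :: qs := by
        cases hqq : ssSplitC r with
        | nil => exact absurd hqq (ssSplitC_ne_nil r)
        | cons q qs => exact ⟨q, qs, rfl⟩
      rw [hq] at h
      simp only [ssConsHd] at h
      obtain ⟨hp, hps⟩ := List.cons.inj h
      subst hps
      rw [← hp]
      rw [show cur ++ (c :: q) = (cur ++ [c]) ++ q by simp]
      rw [ih parts (cur ++ [c]) q qs hq]
      have hdc : ssDelta (cur ++ [c]) = ssDelta cur + ssDelta [c] := ssDelta_append _ _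
      by_cases h1 : c = '{'
      · subst h1
        have hd2 : ssDelta (cur ++ ['{']) = ssDelta cur + 1 := by
          have h9 : ssDelta ['{'] = 1 := by decide
          rw [hdc, h9]
        rw [hd2, show ssSegs ('{' :: r) (ssDelta cur)
            = ssConsHd '{' (ssSegs r (ssDelta cur + 1)) by simp [ssSegs], ssGlue_consHd]
      · by_cases h2 : c = '}'
        · subst h2
          have hd2 : ssDelta (cur ++ ['}']) = ssDelta cur - 1 := by
            have h9 : ssDelta ['}'] = -1 := by decide
            rw [hdc, h9]; ring
          rw [hd2, show ssSegs ('}' :: r) (ssDelta cur)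
              = ssConsHd '}' (ssSegs r (ssDelta cur - 1)) by simp [ssSegs], ssGlue_consHd]
        · have hz : ssDelta (cur ++ [c]) = ssDelta cur := by
            rw [hdc, ssDelta_single, if_neg h1, if_neg h2]; ring
          rw [hz, show ssSegs (c :: r) (ssDelta cur) = ssConsHd c (ssSegs r (ssDelta cur)) by
            simp [ssSegs, h1, h2, hc], ssGlue_consHd]

-- ===== VERDICT (by name: the statement is the Claim_ definition above) =====
theorem special_split_spec : Claim_equal_special_split := by
  intro text _
  unfold Spec_special_split
  cases h : ssAFind text.toList 0 with
  | none =>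
    have hf : PySem.Str.find text ":" = -1 := by rw [find_colon, h]
    simp only [special_split, special_split_alt, h]
    rw [hf]
    simp
  | some i =>
    obtain ⟨-, hlen, hget⟩ := ssAFind_some text.toList 0 i h
    simp only [Nat.sub_zero] at hlen hget
    have hgete : text.toList[i] = ':' := by
      have := List.getElem?_eq_getElem hlen
      rw [this] at hget; exact Option.some.inj hget
    have hdrop : text.toList.drop i = ':' :: text.toList.drop (i + 1) := by
      rw [List.drop_eq_getElem_cons hlen, hgete]
    have hf : PySem.Str.find text ":" = (i : Int) := by rw [find_colon, h]
    have hne : ¬ ((i : Int) = -1) := by omega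
    simp only [special_split, special_split_alt, h]
    rw [hf, if_neg hne]
    -- A side
    rw [hdrop]
    rw [show ∀ spl, ssALoop text.toList (':' :: text.toList.drop (i + 1)) i 0 ((i : Int) + 1) spl
        = ssALoop text.toList (text.toList.drop (i + 1)) (i + 1) 0 ((i : Int) + 1) spl from
      fun spl => by simp [ssALoop]]
    rw [show ((i : Int) + 1) = (((i + 1 : Nat)) : Int) by push_cast; ring]
    have hA := ssA_loop text text.toList (text.toList.drop (i + 1)) (i + 1) (i + 1) 0
      [String.ofList (PySem.List.slice text.toList none (some (i : Int)))] rfl le_rfl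
    rw [ssAFin] at hA
    rw [hA]
    -- B side
    have htail : PySem.List.slice text.toList (some (((i + 1 : Nat)) : Int)) none
        = text.toList.drop (i + 1) := by
      rw [PySem.List.slice_from_natCast]
    rw [htail, ssSplitOn_eq]
    obtain ⟨q, qs, hq⟩ : ∃ q qs, ssSplitC (text.toList.drop (i + 1)) = q :: qs := by
      cases hqq : ssSplitC (text.toList.drop (i + 1)) with
      | nil => exact absurd hqq (ssSplitC_ne_nil _)
      | cons q qs => exact ⟨q, qs, rfl⟩
    rw [hq]
    show _ = (List.foldl ssBStep
        ([String.ofList (PySem.List.slice text.toList none (some (i : Int)))], q, ssDelta q) qs).1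
      ++ [String.ofList (List.foldl ssBStep
        ([String.ofList (PySem.List.slice text.toList none (some (i : Int)))], q, ssDelta q) qs).2.1]
    have hB := ssB_merge (text.toList.drop (i + 1))
      [String.ofList (PySem.List.slice text.toList none (some (i : Int)))] [] q qs hq
    simp only [List.nil_append] at hB
    rw [hB, ssGlue_nil _ (ssSegs_ne_nil _ _), ssDelta_nil]
    simp only [Nat.sub_self, List.take_zero]
    rw [ssGlue_nil _ (ssSegs_ne_nil _ _)]
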